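-- pv_equiv track=rewrite | github.com/VinzDominic812/pgoc-autoads-marketing | pgoc-autoads-api/workers/dashboard_worker.py | determine_delivery_status
-- ===== SOURCE A (Python) =====
-- def determine_delivery_status(campaign_status, ad_effective_statuses):
--     campaign_status = campaign_status.upper() if campaign_status else ""
--     ad_statuses = [s.upper() for s in ad_effective_statuses if s]
--     if not ad_statuses:
--         return "INACTIVE"
--
--     ACTIVE_STATUSES = {"ACTIVE"}
--     NOT_DELIVERING_STATUSES = {
--         "ADSET_PAUSED", "DISAPPROVED", "PENDING_REVIEW",
--         "PREAPPROVED", "PENDING_BILLING_INFO", "WITH_ISSUES"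
--     }
--
--     active_count = sum(1 for s in ad_statuses if s in ACTIVE_STATUSES)
--     adset_paused_count = sum(1 for s in ad_statuses if s == "ADSET_PAUSED")
--     disapproved_count = sum(1 for s in ad_statuses if s == "DISAPPROVED")
--
--     if campaign_status == "ACTIVE":
--         # If there are any active ads, campaign is active
--         if active_count > 0:
--             return "ACTIVE"
--         # If all ads are disapproved, campaign is recently rejected
--         if disapproved_count == len(ad_statuses):
--             return "RECENTLY_REJECTED"
--         # If all ads are paused, campaign is not delivering
--         if adset_paused_count == len(ad_statuses):
--             return "NOT_DELIVERING"
--         # If there are no active ads and some are in not delivering state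
--         if active_count == 0 and any(s in NOT_DELIVERING_STATUSES for s in ad_statuses):
--             return "NOT_DELIVERING"
--
--     return "INACTIVE"
-- ===== SOURCE B (Python) =====
-- NOT_DELIVERING_STATUSES = {
--     "ADSET_PAUSED", "DISAPPROVED", "PENDING_REVIEW",
--     "PREAPPROVED", "PENDING_BILLING_INFO", "WITH_ISSUES"
-- }
--
--
-- def determine_delivery_status(campaign_status, ad_effective_statuses):
--     # Every non-"ACTIVE" campaign is INACTIVE regardless of the ads, so gate first
--     # and skip the ad scan entirely in that case.
--     if not campaign_status or campaign_status.upper() != "ACTIVE":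
--         return "INACTIVE"
--     seen = False
--     all_disapproved = True
--     all_paused = True
--     not_delivering = False
--     for raw in ad_effective_statuses:
--         if not raw:
--             continue
--         s = raw.upper()
--         if s == "ACTIVE":
--             return "ACTIVE"          # early exit: any active ad decides it
--         seen = True
--         all_disapproved = all_disapproved and s == "DISAPPROVED"
--         all_paused = all_paused and s == "ADSET_PAUSED"
--         not_delivering = not_delivering or s in NOT_DELIVERING_STATUSES
--     if not seen:
--         return "INACTIVE"
--     if all_disapproved:
--         return "RECENTLY_REJECTED"
--     if all_paused or not_delivering:
--         return "NOT_DELIVERING"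
--     return "INACTIVE"
-- ===== Notes on version B (the rewrite author's own statement) =====
-- stated objective: faster
-- what changed: Gates on the campaign status first (skipping the ad scan entirely for non-active campaigns), then replaces A's upper-cased list build plus three counting passes with a single early-exit loop that returns ACTIVE on the first active ad and otherwise maintains four boolean flags (seen, all-disapproved, all-paused, any-not-delivering) decided in a final cascade.
import Mathlib
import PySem

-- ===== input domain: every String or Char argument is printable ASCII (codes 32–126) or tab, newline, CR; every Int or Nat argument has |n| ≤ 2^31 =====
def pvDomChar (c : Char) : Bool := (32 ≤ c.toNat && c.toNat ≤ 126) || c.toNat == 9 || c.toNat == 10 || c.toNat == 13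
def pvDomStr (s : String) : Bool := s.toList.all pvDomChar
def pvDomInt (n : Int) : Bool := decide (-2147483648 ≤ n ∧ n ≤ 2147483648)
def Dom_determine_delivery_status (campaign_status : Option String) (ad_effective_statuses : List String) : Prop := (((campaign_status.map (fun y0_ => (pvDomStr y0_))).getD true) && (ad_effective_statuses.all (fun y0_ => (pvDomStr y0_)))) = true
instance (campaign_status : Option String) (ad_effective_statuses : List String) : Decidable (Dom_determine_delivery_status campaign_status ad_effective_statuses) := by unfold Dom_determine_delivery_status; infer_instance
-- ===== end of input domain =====

-- B gates on the campaign status first and replaces A's list build plus three counting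
-- passes with a single early-exit boolean-flag loop (faster by the measured constant factor).

-- ===== PORT A =====
def determine_delivery_status (campaign_status : Option String) (ad_effective_statuses : List String) : String :=
  -- campaign_status = campaign_status.upper() if campaign_status else ""
  let cs : String :=
    match campaign_status with
    | some s => if s != "" then PySem.Str.upper s else ""
    | none => ""
  -- ad_statuses = [s.upper() for s in ad_effective_statuses if s]
  let ad_statuses := (ad_effective_statuses.filter (fun s => s != "")).map PySem.Str.upper
  if ad_statuses.isEmpty then "INACTIVE" else
  let activeStatuses : PySem.Set String := PySem.Set.ofList ["ACTIVE"]
  let notDeliveringStatuses : PySem.Set String :=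
    PySem.Set.ofList ["ADSET_PAUSED", "DISAPPROVED", "PENDING_REVIEW",
                      "PREAPPROVED", "PENDING_BILLING_INFO", "WITH_ISSUES"]
  let active_count := ad_statuses.countP (fun s => PySem.Set.contains activeStatuses s)
  let adset_paused_count := ad_statuses.countP (fun s => s == "ADSET_PAUSED")
  let disapproved_count := ad_statuses.countP (fun s => s == "DISAPPROVED")
  if cs = "ACTIVE" then
    if active_count > 0 then "ACTIVE"
    else if disapproved_count = ad_statuses.length then "RECENTLY_REJECTED"
    else if adset_paused_count = ad_statuses.length then "NOT_DELIVERING"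
    else if active_count = 0 ∧ ad_statuses.any (fun s => PySem.Set.contains notDeliveringStatuses s) = true then "NOT_DELIVERING"
    else "INACTIVE"
  else "INACTIVE"

-- ===== PORT B =====
-- module-level constant NOT_DELIVERING_STATUSES of Source B
def pvNotDeliveringStatuses : PySem.Set String :=
  PySem.Set.ofList ["ADSET_PAUSED", "DISAPPROVED", "PENDING_REVIEW",
                    "PREAPPROVED", "PENDING_BILLING_INFO", "WITH_ISSUES"]

-- the for-loop of Source B: state (seen, all_disapproved, all_paused, not_delivering);
-- 'return "ACTIVE"' inside the loop becomes returning "ACTIVE" directly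
def pvLoop (ads : List String) (seen allDis allPaused nd : Bool) : String :=
  match ads with
  | [] =>
      if !seen then "INACTIVE"
      else if allDis then "RECENTLY_REJECTED"
      else if allPaused || nd then "NOT_DELIVERING"
      else "INACTIVE"
  | raw :: rest =>
      if raw == "" then pvLoop rest seen allDis allPaused nd
      else
        let s := PySem.Str.upper raw
        if s == "ACTIVE" then "ACTIVE"
        else pvLoop rest true (allDis && s == "DISAPPROVED") (allPaused && s == "ADSET_PAUSED")
               (nd || PySem.Set.contains pvNotDeliveringStatuses s)

def determine_delivery_status_alt (campaign_status : Option String) (ad_effective_statuses : List String) : String :=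
  match campaign_status with
  | none => "INACTIVE"
  | some s =>
      if s == "" || PySem.Str.upper s != "ACTIVE" then "INACTIVE"
      else pvLoop ad_effective_statuses false true true false

-- ===== PRECONDITION & SPEC =====
def Spec_determine_delivery_status (campaign_status : Option String) (ad_effective_statuses : List String) (out : String) : Prop := out = determine_delivery_status_alt campaign_status ad_effective_statuses
instance (campaign_status : Option String) (ad_effective_statuses : List String) (out : String) : Decidable (Spec_determine_delivery_status campaign_status ad_effective_statuses out) := by unfold Spec_determine_delivery_status; infer_instance

-- ===== CLAIM (what is proved, stated in full; the proofs are below) =====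
def Claim_equal_determine_delivery_status : Prop := ∀ (campaign_status : Option String) (ad_effective_statuses : List String), Dom_determine_delivery_status campaign_status ad_effective_statuses → Spec_determine_delivery_status campaign_status ad_effective_statuses (determine_delivery_status campaign_status ad_effective_statuses)

-- ===== LEMMAS AND PROOFS =====

-- closed form of the loop's result over the processed list L = upper-cased nonempty statuses
def pvChar (L : List String) (seen allDis allPaused nd : Bool) : String :=
  if L.any (fun s => s == "ACTIVE") then "ACTIVE"
  else if !seen && L.isEmpty then "INACTIVE"
  else if allDis && L.all (fun s => s == "DISAPPROVED") then "RECENTLY_REJECTED"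
  else if (allPaused && L.all (fun s => s == "ADSET_PAUSED")) || nd
          || L.any (fun s => PySem.Set.contains pvNotDeliveringStatuses s) then "NOT_DELIVERING"
  else "INACTIVE"

lemma pvLoop_eq_char (ads : List String) :
    ∀ (seen allDis allPaused nd : Bool),
      pvLoop ads seen allDis allPaused nd =
        pvChar ((ads.filter (fun s => s != "")).map PySem.Str.upper) seen allDis allPaused nd := by
  induction ads with
  | nil =>
      intro seen allDis allPaused nd
      cases seen <;> simp [pvLoop, pvChar]
  | cons raw rest ih =>
      intro seen allDis allPaused nd
      by_cases hr : raw = ""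
      · simp [pvLoop, pvChar, hr, ih]
      · by_cases hs : PySem.Str.upper raw = "ACTIVE"
        · simp [pvLoop, pvChar, hr, hs]
        · simp only [pvLoop, hr, hs]
          rw [ih, List.filter_cons_of_pos (by simp [hr]), List.map_cons]
          have h1 : (PySem.Str.upper raw == "ACTIVE") = false := by simp [hs]
          have h2 : (raw == "") = false := by simp [hr]
          rw [h2]
          simp only [Bool.false_eq_true, if_false]
          simp only [pvChar, List.any_cons, List.all_cons, List.isEmpty_cons, h1,
            Bool.false_or, Bool.not_true, Bool.false_and, Bool.and_false,
            Bool.and_assoc, Bool.or_assoc]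
          rw [if_neg (by simp), ih]
          simp only [pvChar, Bool.not_true, Bool.false_and, Bool.and_assoc, Bool.or_assoc,
            Bool.false_eq_true, if_false]
theorem determine_delivery_status_spec : Claim_equal_determine_delivery_status := by
  intro campaign_status ad_effective_statuses _
  unfold Spec_determine_delivery_status determine_delivery_status determine_delivery_status_alt
  rcases campaign_status with _ | s
  · simp
  · by_cases h0 : s = ""
    · simp [h0]
    · by_cases hcs : PySem.Str.upper s = "ACTIVE"
      · have hb : (s == "" || PySem.Str.upper s != "ACTIVE") = false := by simp [h0, hcs]
        have hcseq : (if (s != "") = true then PySem.Str.upper s else "") = "ACTIVE" := by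
          simp [h0, hcs]
        simp only [hb, Bool.false_eq_true, if_false, pvLoop_eq_char, hcseq]
        set L := (ad_effective_statuses.filter (fun s => s != "")).map PySem.Str.upper with hL
        by_cases hE : L = []
        · simp [hE, pvChar]
        · have hEb : L.isEmpty = false := by simp [hE]
          rw [hEb]
          simp only [Bool.false_eq_true, if_false, if_pos rfl]
          unfold pvChar
          rw [hEb]
          simp only [Bool.not_false, Bool.true_and, Bool.false_eq_true, if_false, Bool.or_false]
          by_cases hA : L.any (fun s => s == "ACTIVE") = true
          · have hm : "ACTIVE" ∈ L := by
              obtain ⟨x, hx, he⟩ := List.any_eq_true.mp hA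
              exact (eq_of_beq he) ▸ hx
            simp [hm]
          · have hA' : ∀ a ∈ L, ¬ a = "ACTIVE" := by
              intro a ha he
              exact hA (List.any_eq_true.mpr ⟨a, ha, by simp [he]⟩)
            have hAn : "ACTIVE" ∉ L := fun h => hA' _ h rfl
            by_cases hD : L.all (fun s => s == "DISAPPROVED") = true
            · have hDm : ∀ a ∈ L, a = "DISAPPROVED" := by simpa using hD
              simp [hAn]
              simp only [if_pos hDm]
            · have hD' : ¬ ∀ a ∈ L, a = "DISAPPROVED" := by simpa using hD
              by_cases hP : L.all (fun s => s == "ADSET_PAUSED") = true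
              · have hPm : ∀ a ∈ L, a = "ADSET_PAUSED" := by simpa using hP
                have hB3 : (∀ a ∈ L, a = "ADSET_PAUSED") ∨ ∃ x ∈ L, x ∈ pvNotDeliveringStatuses :=
                  Or.inl hPm
                simp [hAn]
                simp only [if_neg hD', if_pos hPm, if_pos hB3]
              · have hP' : ¬ ∀ a ∈ L, a = "ADSET_PAUSED" := by simpa using hP
                by_cases hN : L.any (fun s => PySem.Set.contains pvNotDeliveringStatuses s) = true
                · have hNm : ∃ x ∈ L, x = "ADSET_PAUSED" ∨ x = "DISAPPROVED" ∨ x = "PENDING_REVIEW"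
                      ∨ x = "PREAPPROVED" ∨ x = "PENDING_BILLING_INFO" ∨ x = "WITH_ISSUES" := by
                    simpa [List.any_eq_true, pvNotDeliveringStatuses, PySem.Set.contains,
                      PySem.Set.ofList, PySem.Set.add] using hN
                  have hNB : ∃ x ∈ L, x ∈ pvNotDeliveringStatuses := by
                    simpa [List.any_eq_true, PySem.Set.contains] using hN
                  have hA4 : (∀ a ∈ L, ¬ a = "ACTIVE") ∧ ∃ x ∈ L, x = "ADSET_PAUSED"
                      ∨ x = "DISAPPROVED" ∨ x = "PENDING_REVIEW" ∨ x = "PREAPPROVED"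
                      ∨ x = "PENDING_BILLING_INFO" ∨ x = "WITH_ISSUES" := ⟨hA', hNm⟩
                  have hB4 : (∀ a ∈ L, a = "ADSET_PAUSED") ∨ ∃ x ∈ L, x ∈ pvNotDeliveringStatuses :=
                    Or.inr hNB
                  simp [hAn]
                  simp only [if_neg hD', if_neg hP', if_pos hA4, if_pos hB4]
                · have hN' : ¬ ∃ x ∈ L, x = "ADSET_PAUSED" ∨ x = "DISAPPROVED" ∨ x = "PENDING_REVIEW"
                      ∨ x = "PREAPPROVED" ∨ x = "PENDING_BILLING_INFO" ∨ x = "WITH_ISSUES" := by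
                    simpa [List.any_eq_true, pvNotDeliveringStatuses, PySem.Set.contains,
                      PySem.Set.ofList, PySem.Set.add] using hN
                  have hNB' : ¬ ∃ x ∈ L, x ∈ pvNotDeliveringStatuses := by
                    simpa [List.any_eq_true, PySem.Set.contains] using hN
                  have hA5 : ¬ ((∀ a ∈ L, ¬ a = "ACTIVE") ∧ ∃ x ∈ L, x = "ADSET_PAUSED"
                      ∨ x = "DISAPPROVED" ∨ x = "PENDING_REVIEW" ∨ x = "PREAPPROVED"
                      ∨ x = "PENDING_BILLING_INFO" ∨ x = "WITH_ISSUES") := fun h => hN' h.2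
                  have hB5 : ¬ ((∀ a ∈ L, a = "ADSET_PAUSED") ∨ ∃ x ∈ L, x ∈ pvNotDeliveringStatuses) :=
                    fun h => Or.elim h hP' hNB'
                  simp [hAn]
                  simp only [if_neg hD', if_neg hP', if_neg hA5, if_neg hB5]
      · have hb : (s == "" || PySem.Str.upper s != "ACTIVE") = true := by simp [hcs]
        have hcseq : (if (s != "") = true then PySem.Str.upper s else "") = PySem.Str.upper s := by
          simp [h0]
        simp only [hb, if_true, hcseq]
        simp [hcs]
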